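-- pv_equiv track=rewrite | github.com/maninbule/teachPythonLeetcode | 06测试卷/测试卷12/01-1941. 检查是否所有字符出现次数相同.py | areOccurrencesEqual
-- ===== SOURCE A (Python) =====
-- def areOccurrencesEqual(s: str) -> bool:
--     from collections import defaultdict
--     cnt = defaultdict(int)
--     for c in s:
--         cnt[c] += 1
--     # 计数完成了
--     # times = cnt[s[0]]
--     # for c in s:
--     #     if times != cnt[c]:
--     #         return False
--     # return True
--     st = set()
--     for c in s:
--         st.add(cnt[c])
--     return len(st) == 1
-- ===== SOURCE B (Python) =====
-- def areOccurrencesEqual(s: str) -> bool: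
--     from itertools import groupby
--     lens = set()
--     for _, g in groupby(sorted(s)):
--         lens.add(len(list(g)))
--     return len(lens) == 1
-- ===== Notes on version B (the rewrite author's own statement) =====
-- stated objective: alternative
-- what changed: Replaces the hash-counter plus set-of-counts passes by sort-then-groupby: B sorts the string and collects the run-lengths of equal adjacent characters into a set, returning len(set)==1.
import Mathlib
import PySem

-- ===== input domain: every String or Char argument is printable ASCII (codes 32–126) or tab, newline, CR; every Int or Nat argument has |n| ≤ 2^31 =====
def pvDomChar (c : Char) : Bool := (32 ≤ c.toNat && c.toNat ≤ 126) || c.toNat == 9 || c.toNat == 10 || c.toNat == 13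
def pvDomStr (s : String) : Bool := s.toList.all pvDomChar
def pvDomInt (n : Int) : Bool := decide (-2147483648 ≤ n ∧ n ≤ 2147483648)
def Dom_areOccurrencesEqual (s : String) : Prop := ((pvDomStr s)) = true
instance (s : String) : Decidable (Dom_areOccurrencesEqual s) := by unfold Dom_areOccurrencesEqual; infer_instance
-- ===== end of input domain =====

-- B replaces A's hash-counter + set-of-counts passes by sort-then-group: collect run-lengths
-- of equal adjacent characters of the sorted string into a set and test len == 1 (alternative
-- decomposition, not claimed faster).

-- ===== PORT A =====
def areOccurrencesEqual (s : String) : Bool :=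
  let cnt := s.toList.foldl (fun d c => PySem.Dict.modify d c 0 (· + 1)) (PySem.Dict.empty : PySem.Dict Char Int)
  let st := s.toList.foldl (fun st c => PySem.Set.add st (cnt.getD c 0)) PySem.Set.empty
  PySem.Set.len st == 1

-- ===== PORT B =====
-- run lengths of maximal blocks of equal adjacent characters (itertools.groupby on a sorted list)
def runLengths : List Char → List Int
  | [] => []
  | c :: rest =>
      ((rest.takeWhile (· == c)).length + 1 : Int) :: runLengths (rest.dropWhile (· == c))
termination_by l => l.length
decreasing_by
  simp only [List.length_cons]
  exact Nat.lt_succ_of_le (List.length_dropWhile_le _ _)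

def areOccurrencesEqual_alt (s : String) : Bool :=
  let u := PySem.List.sorted s.toList (fun c => c) false
  let lens := (runLengths u).foldl PySem.Set.add PySem.Set.empty
  PySem.Set.len lens == 1

-- ===== PRECONDITION & SPEC =====
def Spec_areOccurrencesEqual (s : String) (out : Bool) : Prop := out = areOccurrencesEqual_alt s
instance (s : String) (out : Bool) : Decidable (Spec_areOccurrencesEqual s out) := by unfold Spec_areOccurrencesEqual; infer_instance

-- ===== CLAIM (what is proved, stated in full; the proofs are below) =====
def Claim_equal_areOccurrencesEqual : Prop := ∀ (s : String), Dom_areOccurrencesEqual s → Spec_areOccurrencesEqual s (areOccurrencesEqual s)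

-- ===== LEMMAS AND PROOFS =====

-- in a ≤-sorted list, the run lengths are exactly the multiplicities of its members
theorem mem_runLengths_iff_count (u : List Char) (hs : u.Pairwise (· ≤ ·)) (x : Int) :
    x ∈ runLengths u ↔ ∃ c ∈ u, (u.count c : Int) = x := by
  induction u using runLengths.induct with
  | case1 => simp [runLengths]
  | case2 c rest ih =>
    set t := rest.takeWhile (· == c) with ht
    set d := rest.dropWhile (· == c) with hd
    have hrest : rest = t ++ d := (List.takeWhile_append_dropWhile (p := (· == c)) (l := rest)).symm
    have htc : ∀ y ∈ t, y = c := by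
      intro y hy
      have := List.mem_takeWhile_imp hy
      simpa using this
    have hdne : ∀ y ∈ d, y ≠ c := by
      intro y hy
      cases hdd : d with
      | nil => simp [hdd] at hy
      | cons e d' =>
        have he : ¬ (e == c) = true := by
          have := List.head?_dropWhile_not (p := (· == c)) (l := rest)
          rw [← hd, hdd] at this; simpa using this
        have hce : c ≤ e := by
          have hmem : e ∈ rest := by rw [hrest, hdd]; simp
          exact (List.pairwise_cons.mp hs).1 e hmem
        have hclt : c < e := lt_of_le_of_ne hce (by simpa using fun h => he (by simp [h.symm]))
        rw [hdd] at hy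
        rcases List.mem_cons.mp hy with rfl | hy'
        · exact ne_of_gt hclt
        · have hrp : rest.Pairwise (· ≤ ·) := (List.pairwise_cons.mp hs).2
          have hdp : (t ++ e :: d').Pairwise (· ≤ ·) := by rw [← hdd, ← hrest]; exact hrp
          have hey : e ≤ y := by
            have := (List.pairwise_append.mp hdp).2.1
            exact (List.pairwise_cons.mp this).1 y hy'
          exact ne_of_gt (lt_of_lt_of_le hclt hey)
    have hcount_c : ((c :: rest).count c : Int) = (t.length + 1 : Int) := by
      have h1 : rest.count c = t.length := by
        rw [hrest, List.count_append]
        have : d.count c = 0 := List.count_eq_zero.mpr (fun h => hdne c h rfl)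
        have ht1 : t.count c = t.length := by
          rw [List.count_eq_length]
          intro y hy; rw [htc y hy]
        omega
      rw [List.count_cons_self]
      push_cast [h1]; ring
    have hcount_d : ∀ c' ∈ d, ((c :: rest).count c' : Int) = (d.count c' : Int) := by
      intro c' hc'
      have hne : c' ≠ c := hdne c' hc'
      have h0 : t.count c' = 0 := List.count_eq_zero.mpr (fun h => hne (htc c' h))
      have h1 : (c :: rest).count c' = rest.count c' := by simp [Ne.symm hne]
      rw [h1, hrest, List.count_append, h0]
      omega
    have hdp : d.Pairwise (· ≤ ·) := by
      have hrp : rest.Pairwise (· ≤ ·) := (List.pairwise_cons.mp hs).2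
      rw [hrest] at hrp
      exact (List.pairwise_append.mp hrp).2.1
    have ihd := ih hdp
    rw [runLengths]
    constructor
    · intro hx
      rcases List.mem_cons.mp hx with rfl | hx'
      · exact ⟨c, by simp, hcount_c⟩
      · rcases (ihd.mp (by simpa using hx')) with ⟨c', hc', hcnt⟩
        refine ⟨c', by rw [hrest]; simp [hc'], ?_⟩
        rw [hcount_d c' hc', hcnt]
    · rintro ⟨c', hc', hcnt⟩
      rcases List.mem_cons.mp hc' with rfl | hc''
      · exact List.mem_cons.mpr (Or.inl (by rw [← hcnt, hcount_c]))
      · rw [hrest] at hc''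
        rcases List.mem_append.mp hc'' with hct | hcd
        · have : c' = c := htc c' hct
          subst this
          exact List.mem_cons.mpr (Or.inl (by rw [← hcnt, hcount_c]))
        · refine List.mem_cons.mpr (Or.inr ?_)
          exact ihd.mpr ⟨c', hcd, by rw [← hcnt, hcount_d c' hcd]⟩

-- two duplicate-free sets with the same members have the same length (used for both ports' sets)
theorem lens_eq_of_mem_iff {X Y : PySem.Set Int} (hx : X.Nodup) (hy : Y.Nodup)
    (h : ∀ x, x ∈ X ↔ x ∈ Y) : (PySem.Set.len X == 1) = (PySem.Set.len Y == 1) := by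
  have hp := (List.perm_ext_iff_of_nodup hx hy).mpr h
  simp [PySem.Set.len, hp.length_eq]

theorem areOccurrencesEqual_spec' (s : String) :
    areOccurrencesEqual s = areOccurrencesEqual_alt s := by
  unfold areOccurrencesEqual areOccurrencesEqual_alt
  dsimp only
  rw [← PySem.Set.update_map_eq_foldl_add, PySem.Set.update_empty,
    show (PySem.Set.empty : PySem.Set Int) = [] from rfl, ← PySem.Set.ofList_eq_foldl]
  apply lens_eq_of_mem_iff
  case hx => exact PySem.Set.nodup_ofList _
  case hy => exact PySem.Set.nodup_ofList _
  intro x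
  rw [PySem.Set.mem_ofList, PySem.Set.mem_ofList, List.mem_map]
  have hcnt : ∀ c : Char,
      (s.toList.foldl (fun d c => PySem.Dict.modify d c 0 (· + 1)) (PySem.Dict.empty : PySem.Dict Char Int)).getD c 0
        = (s.toList.count c : Int) := fun c => by
    simp [PySem.Dict.getD_foldl_modify_add_one]
  have hperm : (PySem.List.sorted s.toList (fun c => c) false).Perm s.toList :=
    PySem.List.sorted_perm s.toList (fun c => c) false
  have hiff := mem_runLengths_iff_count (PySem.List.sorted s.toList (fun c => c) false)
    (PySem.List.sorted_pairwise s.toList (fun c => c)) x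
  constructor
  · rintro ⟨c, hc, hfc⟩
    refine hiff.mpr ⟨c, hperm.mem_iff.mpr hc, ?_⟩
    rw [hperm.count_eq]
    exact (hcnt c).symm.trans hfc
  · intro hx
    rcases hiff.mp hx with ⟨c, hc, hcx⟩
    have hlx : (s.toList.count c : Int) = x := by
      rw [← hperm.count_eq]; exact hcx
    exact ⟨c, hperm.mem_iff.mp hc, (hcnt c).trans hlx⟩

-- ===== VERDICT (by name: the statement is the Claim_ definition above) =====
theorem areOccurrencesEqual_spec : Claim_equal_areOccurrencesEqual := by
  intro s _
  exact areOccurrencesEqual_spec' s
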